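-- pv_equiv track=rewrite | github.com/qqqppma/maple | app2 - 복사본(250423).py | get_drop_range
-- ===== SOURCE A (Python) =====
-- def get_drop_range(slots):
--     try:
--         if not slots:
--             return ""
--         times = sorted(set([s.split()[0] for s in slots.split(",") if s.strip()]))
--         return f"{times[0]} ~ {times[-1]}" if times else ""
--     except:
--         return ""
-- ===== SOURCE B (Python) =====
-- def get_drop_range(slots):
--     # single pass: running min/max over the first tokens, no set/sort
--     if not slots:
--         return ""
--     lo = hi = None
--     for piece in slots.split(","):
--         toks = piece.split()
--         if toks:
--             t = toks[0]
--             if lo is None or t < lo: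
--                 lo = t
--             if hi is None or t > hi:
--                 hi = t
--     return f"{lo} ~ {hi}" if lo is not None else ""
-- ===== Notes on version B (the rewrite author's own statement) =====
-- stated objective: simpler
-- what changed: Replaces build-a-set-then-sort-then-index (and the try/except guarding the indexing) with a single pass over the comma pieces that keeps a running lexicographic minimum and maximum of the first tokens.
import Mathlib
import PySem

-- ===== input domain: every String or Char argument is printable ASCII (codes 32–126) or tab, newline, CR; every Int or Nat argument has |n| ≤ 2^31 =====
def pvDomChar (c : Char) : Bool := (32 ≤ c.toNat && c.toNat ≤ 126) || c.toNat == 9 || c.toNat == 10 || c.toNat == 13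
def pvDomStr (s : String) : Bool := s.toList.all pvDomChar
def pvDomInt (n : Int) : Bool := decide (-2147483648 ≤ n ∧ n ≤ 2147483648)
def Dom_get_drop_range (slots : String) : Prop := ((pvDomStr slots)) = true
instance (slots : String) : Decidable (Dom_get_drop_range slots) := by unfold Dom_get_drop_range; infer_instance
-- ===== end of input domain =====

-- B replaces A's set+sort+index (with its try/except) by one pass keeping a running min/max
-- of the first tokens — simpler, same return value everywhere.

-- ===== PORT A =====
-- helper for the list comprehension's 's.split()[0]' lookups: a 'none' is the
-- IndexError that A's bare 'except' would catch (never reached: the filter keeps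
-- only pieces with a non-empty strip, whose split() is non-empty)
def pvSeqStr : List (Option String) → Option (List String)
  | [] => some []
  | none :: _ => none
  | some x :: rest => (pvSeqStr rest).map (x :: ·)

def get_drop_range (slots : String) : String :=
  if slots = "" then ""                                   -- 'if not slots: return ""'
  else
    -- times = sorted(set([s.split()[0] for s in slots.split(",") if s.strip()]))
    match pvSeqStr ((((PySem.Str.split? slots ",").getD []).filter
        (fun s => !(PySem.Str.strip s == ""))).map
        (fun s => PySem.List.pyGet? (PySem.Str.split₀ s) 0)) with
    | none => ""                                          -- the 'except: return ""' path
    | some toks =>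
      let times := PySem.List.sorted (PySem.Set.ofList toks) (fun x => x) false
      -- f"{times[0]} ~ {times[-1]}" if times else ""  (indices safe exactly when times ≠ [])
      match PySem.List.pyGet? times 0, PySem.List.pyGet? times (-1) with
      | some a, some b => PySem.Str.join " ~ " [a, b]
      | _, _ => ""

-- ===== PORT B =====
-- loop body: toks = piece.split(); if toks: t = toks[0]; update running lo/hi
def pvStep (acc : Option (String × String)) (piece : String) : Option (String × String) :=
  match PySem.Str.split₀ piece with
  | [] => acc
  | t :: _ =>
    match acc with
    | none => some (t, t)
    | some (lo, hi) => some ((if t < lo then t else lo), (if hi < t then t else hi))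

def get_drop_range_alt (slots : String) : String :=
  if slots = "" then ""
  else
    match ((PySem.Str.split? slots ",").getD []).foldl pvStep none with
    | none => ""
    | some (lo, hi) => PySem.Str.join " ~ " [lo, hi]

-- ===== PRECONDITION & SPEC =====
def Spec_get_drop_range (slots : String) (out : String) : Prop := out = get_drop_range_alt slots
instance (slots : String) (out : String) : Decidable (Spec_get_drop_range slots out) := by unfold Spec_get_drop_range; infer_instance

-- ===== CLAIM (what is proved, stated in full; the proofs are below) =====
def Claim_equal_get_drop_range : Prop := ∀ (slots : String), Dom_get_drop_range slots → Spec_get_drop_range slots (get_drop_range slots)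

-- ===== LEMMAS AND PROOFS =====

theorem pv_go_ne_nil (s cur : List Char) (acc : List (List Char))
    (h : acc ≠ [] ∨ cur ≠ []) : PySem.Chars.split₀.go s cur acc ≠ [] := by
  induction s generalizing cur acc with
  | nil =>
    simp only [PySem.Chars.split₀.go]
    rcases h with h | h
    · split
      · simpa using h
      · simp
    · have : cur.isEmpty = false := by simpa [List.isEmpty_iff] using h
      simp [this]
  | cons c rest ih =>
    simp only [PySem.Chars.split₀.go]
    split
    · split
      · rename_i hsp hcur
        have : acc ≠ [] := by
          rcases h with h | h; exact h
          exact absurd (List.isEmpty_iff.mp hcur) h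
        exact ih [] acc (Or.inl this)
      · exact ih [] _ (Or.inl (by simp))
    · exact ih (c :: cur) acc (Or.inr (by simp))

theorem pv_split₀_nil_iff (s : List Char) :
    PySem.Chars.split₀ s = [] ↔ ∀ c ∈ s, PySem.Chars.isspace c = true := by
  show PySem.Chars.split₀.go s [] [] = [] ↔ _
  induction s with
  | nil => simp [PySem.Chars.split₀.go]
  | cons c rest ih =>
    simp only [PySem.Chars.split₀.go]
    by_cases hc : PySem.Chars.isspace c = true
    · simp [hc, ih]
    · simp only [hc, List.isEmpty_nil]
      constructor
      · intro h; exact absurd h (pv_go_ne_nil rest [c] [] (Or.inr (by simp)))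
      · intro h; exact absurd (h c (by simp)) hc

theorem pv_strip_nil_iff (s : List Char) :
    PySem.Chars.strip s = [] ↔ ∀ c ∈ s, PySem.Chars.isspace c = true := by
  simp only [PySem.Chars.strip, PySem.Chars.rstrip, PySem.Chars.lstrip]
  rw [List.reverse_eq_nil_iff, List.dropWhile_eq_nil_iff]
  constructor
  · intro h c hc
    have hc' : c ∈ List.takeWhile PySem.Chars.isspace s ++ List.dropWhile PySem.Chars.isspace s := by
      rw [List.takeWhile_append_dropWhile]; exact hc
    rcases List.mem_append.mp hc' with h1 | h1
    · exact List.mem_takeWhile_imp h1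
    · exact h c (by simpa using h1)
  · intro h c hc
    exact h c (List.dropWhile_subset _ (by simpa using hc))

-- A's filter test 's.strip() != ""' holds exactly when 's.split()' is non-empty
theorem pv_strip_iff_split₀ (s : String) :
    (!(PySem.Str.strip s == "")) = true ↔ PySem.Str.split₀ s ≠ [] := by
  have h1 : (PySem.Str.strip s = "") ↔ PySem.Chars.strip s.toList = [] := by
    constructor
    · intro h; rw [← PySem.Str.toList_strip, h]; rfl
    · intro h; exact String.toList_eq_nil_iff.mp (by rw [PySem.Str.toList_strip]; exact h)
  have h2 : (PySem.Str.split₀ s = []) ↔ PySem.Chars.split₀ s.toList = [] := by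
    constructor
    · intro h; rw [← PySem.Str.split₀_map_toList, h]; rfl
    · intro h
      have := PySem.Str.split₀_map_toList s
      rw [h] at this
      exact List.map_eq_nil_iff.mp this
  simp only [Bool.not_eq_eq_eq_not, Bool.not_true, beq_eq_false_iff_ne, ne_eq]
  exact not_congr (by rw [h1, h2, pv_strip_nil_iff, pv_split₀_nil_iff])

theorem pv_pyGet?_zero (l : List String) : PySem.List.pyGet? l 0 = l.head? := by
  cases l <;> simp [PySem.List.pyGet?, PySem.List.pyIdx?]

theorem pv_pyGet?_neg_one (l : List String) : PySem.List.pyGet? l (-1) = l.getLast? := by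
  cases l with
  | nil => simp [PySem.List.pyGet?, PySem.List.pyIdx?]
  | cons a t => simp [PySem.List.pyGet?, PySem.List.pyIdx?, List.getLast?_eq_getElem?]

theorem pv_if_min (t a : String) : (if t < a then t else a) = min a t := by
  rcases lt_or_ge t a with h | h
  · rw [if_pos h, min_eq_right h.le]
  · rw [if_neg (not_lt.mpr h), min_eq_left h]

theorem pv_if_max (t b : String) : (if b < t then t else b) = max b t := by
  rcases lt_or_ge b t with h | h
  · rw [if_pos h, max_eq_right h.le]
  · rw [if_neg (not_lt.mpr h), max_eq_left h]

-- the tokens both programs effectively process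
def pvToks (ps : List String) : List String :=
  ps.filterMap (fun p => (PySem.Str.split₀ p).head?)

-- A's comprehension succeeds and yields exactly pvToks
theorem pv_seq_eq (ps : List String) :
    pvSeqStr ((ps.filter (fun s => !(PySem.Str.strip s == ""))).map
      (fun s => PySem.List.pyGet? (PySem.Str.split₀ s) 0)) = some (pvToks ps) := by
  induction ps with
  | nil => simp [pvSeqStr, pvToks]
  | cons p rest ih =>
    by_cases hp : PySem.Str.split₀ p = []
    · have : (!(PySem.Str.strip p == "")) = false := by
        cases h : (!(PySem.Str.strip p == "")) with
        | false => rfl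
        | true => exact absurd hp ((pv_strip_iff_split₀ p).mp h)
      simp [pvToks, this, hp] at *
      exact ih
    · have hkeep : (!(PySem.Str.strip p == "")) = true := (pv_strip_iff_split₀ p).mpr hp
      obtain ⟨t, ts, hts⟩ := List.exists_cons_of_ne_nil hp
      simp [pvToks, hkeep, hts, pv_pyGet?_zero, pvSeqStr] at *
      exact ih

-- B's fold, restated over pvToks
theorem pv_foldB_eq (ps : List String) :
    ps.foldl pvStep none =
      match pvToks ps with
      | [] => none
      | t :: rest => some (rest.foldl min t, rest.foldl max t) := by
  have key : ∀ (ps : List String) (a b : String),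
      ps.foldl pvStep (some (a, b)) = some ((pvToks ps).foldl min a, (pvToks ps).foldl max b) := by
    intro ps a b
    induction ps generalizing a b with
    | nil => simp [pvToks]
    | cons p rest ih =>
      by_cases hp : PySem.Str.split₀ p = []
      · simp [pvToks, List.foldl_cons, pvStep, hp] at *
        exact ih a b
      · obtain ⟨t, ts, hts⟩ := List.exists_cons_of_ne_nil hp
        simp only [pvToks, List.foldl_cons, pvStep, hts, List.filterMap_cons, List.head?_cons] at *
        rw [ih, pv_if_min, pv_if_max]
  induction ps with
  | nil => rfl
  | cons p rest ih =>
    by_cases hp : PySem.Str.split₀ p = []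
    · simpa [pvToks, List.foldl_cons, pvStep, hp] using ih
    · obtain ⟨t, ts, hts⟩ := List.exists_cons_of_ne_nil hp
      simp only [pvToks, List.foldl_cons, pvStep, hts, List.filterMap_cons, List.head?_cons]
      exact key rest t t

-- head/last of A's sorted set are the running min/max of the token list
theorem pv_sorted_head_last (t : String) (rest : List String) :
    (PySem.List.sorted (PySem.Set.ofList (t :: rest)) (fun x => x) false).head? = some (rest.foldl min t) ∧
    (PySem.List.sorted (PySem.Set.ofList (t :: rest)) (fun x => x) false).getLast? = some (rest.foldl max t) := by
  set u := PySem.List.sorted (PySem.Set.ofList (t :: rest)) (fun x => x) false with hu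
  have hperm := PySem.List.sorted_perm (PySem.Set.ofList (t :: rest)) (fun x => x) false
  have hmem : ∀ y : String, y ∈ u ↔ y ∈ t :: rest := by
    intro y
    rw [← hu] at hperm
    rw [hperm.mem_iff, PySem.Set.mem_ofList]
  have hne : u ≠ [] := by
    intro h
    have : t ∈ u := (hmem t).mpr (by simp)
    rw [h] at this; exact absurd this (List.not_mem_nil)
  have hlen : 0 < u.length := List.length_pos_iff.mpr hne
  constructor
  · -- head = min
    rw [List.head?_eq_getElem?, List.getElem?_eq_getElem hlen]
    congr 1
    have hm_mem : u[0] ∈ t :: rest := (hmem _).mp (List.getElem_mem hlen)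
    have hm_le : ∀ y ∈ t :: rest, u[0] ≤ y := by
      intro y hy
      obtain ⟨q, hq, hqy⟩ := List.getElem_of_mem ((hmem y).mpr hy)
      rw [← hqy]
      exact PySem.List.sorted_id_getElem_mono (PySem.Set.ofList (t :: rest)) (Nat.zero_le q) hq
    have h1 := PySem.List.foldl_min_le rest t
    have h2 : rest.foldl min t ∈ t :: rest := by
      rcases PySem.List.foldl_min_mem rest t with h | h
      · rw [h]; simp
      · exact List.mem_cons_of_mem _ h
    exact le_antisymm (hm_le _ h2)
      (by rcases List.mem_cons.mp hm_mem with h | h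
          · exact h1.1.trans h.ge
          · exact h1.2 _ (by simpa using h))
  · -- last = max
    rw [List.getLast?_eq_getElem?, List.getElem?_eq_getElem (by omega)]
    congr 1
    have hlt : u.length - 1 < u.length := by omega
    have hm_mem : u[u.length - 1] ∈ t :: rest := (hmem _).mp (List.getElem_mem hlt)
    have hm_ge : ∀ y ∈ t :: rest, y ≤ u[u.length - 1] := by
      intro y hy
      obtain ⟨q, hq, hqy⟩ := List.getElem_of_mem ((hmem y).mpr hy)
      rw [← hqy]
      exact PySem.List.sorted_id_getElem_mono (PySem.Set.ofList (t :: rest)) (by omega) hlt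
    have h1 := PySem.List.le_foldl_max rest t
    have h2 : rest.foldl max t ∈ t :: rest := by
      rcases PySem.List.foldl_max_mem rest t with h | h
      · rw [h]; simp
      · exact List.mem_cons_of_mem _ h
    exact le_antisymm
      (by rcases List.mem_cons.mp hm_mem with h | h
          · exact h.le.trans h1.1
          · exact h1.2 _ (by simpa using h))
      (hm_ge _ h2)

-- ===== VERDICT (by name: the statement is the Claim_ definition above) =====
theorem get_drop_range_spec : Claim_equal_get_drop_range := by
  intro slots _
  unfold Spec_get_drop_range get_drop_range get_drop_range_alt
  by_cases hs : slots = ""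
  · simp [hs]
  · simp only [hs, if_false]
    set ps := (PySem.Str.split? slots ",").getD [] with hps
    rw [pv_seq_eq ps, pv_foldB_eq ps]
    cases hts : pvToks ps with
    | nil =>
      simp [PySem.Set.ofList, PySem.List.pyGet?, PySem.List.pyIdx?, PySem.List.sorted]
    | cons t rest =>
      obtain ⟨h1, h2⟩ := pv_sorted_head_last t rest
      have hA : PySem.List.pyGet? (PySem.List.sorted (PySem.Set.ofList (t :: rest)) (fun x => x) false) 0
          = some (rest.foldl min t) := by rw [pv_pyGet?_zero]; exact h1
      have hB : PySem.List.pyGet? (PySem.List.sorted (PySem.Set.ofList (t :: rest)) (fun x => x) false) (-1)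
          = some (rest.foldl max t) := by rw [pv_pyGet?_neg_one]; exact h2
      simp only [hA, hB]
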